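-- pv_equiv track=rewrite | github.com/zer0abs/cfo-guru | modules/recommendations.py | _limit_healthy_recommendations
-- ===== SOURCE A (Python) =====
-- from typing import TypedDict
--
-- class Recommendation(TypedDict):
--     """Structured recommendation object returned by the engine."""
--
--     id: str
--     title: str
--     category: str
--     issue: str
--     action: str
--     rationale: str
--     priority: str
--     estimated_impact: str
--     metric_reference: str
--     evidence: str
--     status: str
--
-- MAX_HEALTHY_RECOMMENDATIONS = 2
--
-- def _limit_healthy_recommendations(
--     recommendations: list[Recommendation],
-- ) -> list[Recommendation]:
--     """Keep healthy insights useful but subordinate to warnings."""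
--     healthy_count = 0
--     filtered_recommendations: list[Recommendation] = []
--     for recommendation in recommendations:
--         if recommendation["status"] == "healthy":
--             healthy_count += 1
--             if healthy_count > MAX_HEALTHY_RECOMMENDATIONS:
--                 continue
--         filtered_recommendations.append(recommendation)
--     return filtered_recommendations
-- ===== SOURCE B (Python) =====
-- MAX_HEALTHY_RECOMMENDATIONS = 2
--
-- def _limit_healthy_recommendations(recommendations):
--     """Keep healthy insights useful but subordinate to warnings."""
--     healthy_indices = [i for i, r in enumerate(recommendations) if r["status"] == "healthy"]
--     drop = set(healthy_indices[MAX_HEALTHY_RECOMMENDATIONS:])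
--     return [r for i, r in enumerate(recommendations) if i not in drop]
-- ===== Notes on version B (the rewrite author's own statement) =====
-- stated objective: alternative
-- what changed: Replaces the running healthy-counter with a branching loop by a two-phase pass: first collect the indices of healthy items, then drop the set of healthy indices beyond the cap in a single filtering comprehension.
import Mathlib
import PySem

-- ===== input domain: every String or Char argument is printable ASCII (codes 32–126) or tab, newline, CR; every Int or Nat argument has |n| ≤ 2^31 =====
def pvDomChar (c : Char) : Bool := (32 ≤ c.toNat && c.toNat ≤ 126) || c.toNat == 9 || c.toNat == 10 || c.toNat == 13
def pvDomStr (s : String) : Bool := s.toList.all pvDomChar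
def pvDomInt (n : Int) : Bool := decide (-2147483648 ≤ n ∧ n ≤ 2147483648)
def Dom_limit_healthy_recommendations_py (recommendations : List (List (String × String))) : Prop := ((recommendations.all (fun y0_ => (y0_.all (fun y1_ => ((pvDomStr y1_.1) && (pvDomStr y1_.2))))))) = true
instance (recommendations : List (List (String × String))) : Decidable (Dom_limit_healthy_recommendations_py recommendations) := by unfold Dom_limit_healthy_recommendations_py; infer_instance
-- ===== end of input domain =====

-- B replaces A's running counter-with-branch loop by a two-phase decomposition (collect healthy
-- indices, drop the ones beyond the cap via a membership set); alternative, same cost.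

-- r["status"] as a total function; exact wherever the key is present (Pre_ below), KeyError otherwise
def pvStatusD (r : List (String × String)) : String := (PySem.Dict.mk r).getD "status" ""

-- ===== PORT A =====
def limit_healthy_recommendations_py (recommendations : List (List (String × String))) : List (List (String × String)) :=
  (recommendations.foldl
    (fun (st : Int × List (List (String × String))) recommendation =>
      if pvStatusD recommendation == "healthy" then
        -- healthy_count += 1; if healthy_count > MAX_HEALTHY_RECOMMENDATIONS: continue
        if st.1 + 1 > 2 then (st.1 + 1, st.2) else (st.1 + 1, st.2 ++ [recommendation])
      else (st.1, st.2 ++ [recommendation]))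
    ((0 : Int), ([] : List (List (String × String))))).2

-- ===== PORT B =====
def limit_healthy_recommendations_py_alt (recommendations : List (List (String × String))) : List (List (String × String)) :=
  let healthy_indices : List Int :=
    ((PySem.List.enumerate recommendations).filter (fun p => pvStatusD p.2 == "healthy")).map (·.1)
  let drop : PySem.Set Int := PySem.Set.ofList (PySem.List.slice healthy_indices (some 2) none)
  ((PySem.List.enumerate recommendations).filter (fun p => !(PySem.Set.contains drop p.1))).map (·.2)

-- ===== PRECONDITION & SPEC =====
-- Pre_ excludes exactly the inputs where some recommendation lacks a "status" key: there the
-- Python A (and B alike) raises KeyError instead of returning.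
def Pre_limit_healthy_recommendations_py (recommendations : List (List (String × String))) : Prop :=
  ∀ r ∈ recommendations, (PySem.Dict.mk r).contains "status" = true
instance (recommendations : List (List (String × String))) : Decidable (Pre_limit_healthy_recommendations_py recommendations) := by unfold Pre_limit_healthy_recommendations_py; infer_instance

def pvWitness_limit_healthy_recommendations_py : (List (List (String × String))) :=
  [[("status", "healthy")], [("status", "warning")], [("status", "healthy")], [("status", "healthy")]]

def Spec_limit_healthy_recommendations_py (recommendations : List (List (String × String))) (out : List (List (String × String))) : Prop := out = limit_healthy_recommendations_py_alt recommendations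
instance (recommendations : List (List (String × String))) (out : List (List (String × String))) : Decidable (Spec_limit_healthy_recommendations_py recommendations out) := by unfold Spec_limit_healthy_recommendations_py; infer_instance

-- ===== CLAIM (what is proved, stated in full; the proofs are below) =====
def Claim_equal_limit_healthy_recommendations_py : Prop := ∀ (recommendations : List (List (String × String))), Dom_limit_healthy_recommendations_py recommendations → Pre_limit_healthy_recommendations_py recommendations → Spec_limit_healthy_recommendations_py recommendations (limit_healthy_recommendations_py recommendations)

-- ===== LEMMAS AND PROOFS =====

-- common normal form: keep items while a budget of d healthy slots remains
def pvGo (t : List (List (String × String))) (d : Nat) : List (List (String × String)) :=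
  match t, d with
  | [], _ => []
  | r :: t, d =>
    if pvStatusD r == "healthy" then
      (if d = 0 then pvGo t 0 else r :: pvGo t (d - 1))
    else r :: pvGo t d

-- the indices at which healthy items sit, starting at offset n
def pvHIdx (t : List (List (String × String))) (n : Int) : List Int :=
  match t with
  | [] => []
  | r :: t => if pvStatusD r == "healthy" then n :: pvHIdx t (n + 1) else pvHIdx t (n + 1)

lemma pvHIdx_ge (t : List (List (String × String))) (n : Int) (i : Int) (h : i ∈ pvHIdx t n) : n ≤ i := by
  induction t generalizing n with
  | nil => simp [pvHIdx] at h
  | cons r t ih =>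
    simp only [pvHIdx] at h
    split at h
    · rcases List.mem_cons.1 h with rfl | h
      · omega
      · have := ih (n + 1) h; omega
    · have := ih (n + 1) h; omega

lemma pvHealthy_indices_eq (t : List (List (String × String))) (n : Int) :
    ((PySem.List.enumerate t n).filter (fun p => pvStatusD p.2 == "healthy")).map (·.1) = pvHIdx t n := by
  induction t generalizing n with
  | nil => simp [PySem.List.enumerate_nil, pvHIdx]
  | cons r t ih =>
    simp only [PySem.List.enumerate_cons, pvHIdx, List.filter_cons]
    by_cases h : pvStatusD r == "healthy"
    · simp [h, ih]
    · simp [h, ih]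

lemma pvSet_contains_ofList (l : List Int) (x : Int) :
    PySem.Set.contains (PySem.Set.ofList l) x = l.contains x := by
  by_cases h : x ∈ l
  · rw [(PySem.Set.contains_iff _ _).2 ((PySem.Set.mem_ofList _ _).2 h)]
    simp [h]
  · have h1 : PySem.Set.contains (PySem.Set.ofList l) x ≠ true := by
      intro hc; exact h ((PySem.Set.mem_ofList _ _).1 ((PySem.Set.contains_iff _ _).1 hc))
    simp only [Bool.not_eq_true] at h1
    simp [h]

lemma pvB_gen (t : List (List (String × String))) (n : Int) (d : Nat) :
    ((PySem.List.enumerate t n).filter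
        (fun p => !(PySem.Set.contains (PySem.Set.ofList ((pvHIdx t n).drop d)) p.1))).map (·.2)
      = pvGo t d := by
  induction t generalizing n d with
  | nil => simp [PySem.List.enumerate_nil, pvGo]
  | cons r t ih =>
    have hmem : ∀ p ∈ PySem.List.enumerate t (n + 1), n + 1 ≤ p.1 := by
      intro p hp
      rcases (PySem.List.mem_enumerate_iff _ _ _).1 hp with ⟨k, hk, rfl⟩
      omega
    simp only [PySem.List.enumerate_cons, pvHIdx, pvGo, List.filter_cons]
    by_cases hr : pvStatusD r == "healthy"
    · rw [if_pos hr, if_pos hr]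
      by_cases hd : d = 0
      · subst hd
        have hn : PySem.Set.contains (PySem.Set.ofList ((n :: pvHIdx t (n + 1)).drop 0)) n = true := by
          rw [pvSet_contains_ofList]; simp
        rw [List.drop_zero] at hn
        simp only [List.drop_zero, hn, Bool.not_true, Bool.false_eq_true, if_false]
        rw [← ih (n + 1) 0]
        simp only [List.drop_zero]
        congr 1
        apply List.filter_congr
        intro p hp
        have h1 := hmem p hp
        rw [pvSet_contains_ofList, pvSet_contains_ofList]
        simp only [List.contains_cons]
        have hne : (p.1 == n) = false := by simp; omega
        simp [hne]
      · have hdrop : (n :: pvHIdx t (n + 1)).drop d = (pvHIdx t (n + 1)).drop (d - 1) := by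
          cases d with
          | zero => omega
          | succ k => simp
        rw [hdrop]
        have hn : PySem.Set.contains (PySem.Set.ofList ((pvHIdx t (n + 1)).drop (d - 1))) n = false := by
          rw [pvSet_contains_ofList]
          simp only [List.contains_eq_mem, decide_eq_false_iff_not]
          intro hmem2
          have := pvHIdx_ge t (n + 1) n (List.mem_of_mem_drop hmem2)
          omega
        rw [hn]
        simp only [Bool.not_false, if_true, List.map_cons, if_neg hd]
        rw [ih (n + 1) (d - 1)]
    · rw [if_neg hr, if_neg hr]
      have hn : PySem.Set.contains (PySem.Set.ofList ((pvHIdx t (n + 1)).drop d)) n = false := by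
        rw [pvSet_contains_ofList]
        simp only [List.contains_eq_mem, decide_eq_false_iff_not]
        intro hmem2
        have := pvHIdx_ge t (n + 1) n (List.mem_of_mem_drop hmem2)
        omega
      rw [hn]
      simp only [Bool.not_false, if_true, List.map_cons]
      rw [ih (n + 1) d]

lemma pvA_gen (t : List (List (String × String))) (hc : Int) (acc : List (List (String × String))) (h : 0 ≤ hc) :
    (t.foldl
      (fun (st : Int × List (List (String × String))) r =>
        if pvStatusD r == "healthy" then
          if st.1 + 1 > 2 then (st.1 + 1, st.2) else (st.1 + 1, st.2 ++ [r])
        else (st.1, st.2 ++ [r]))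
      (hc, acc)).2 = acc ++ pvGo t (2 - hc).toNat := by
  induction t generalizing hc acc with
  | nil => simp [pvGo]
  | cons r t ih =>
    simp only [List.foldl_cons, pvGo]
    by_cases hr : pvStatusD r == "healthy"
    · rw [if_pos hr, if_pos hr]
      by_cases hgt : hc + 1 > 2
      · have h0 : (2 - hc).toNat = 0 := by omega
        rw [if_pos hgt, h0, if_pos rfl]
        rw [ih (hc + 1) acc (by omega)]
        have he : (2 - (hc + 1)).toNat = 0 := by omega
        rw [he]
      · have h0 : (2 - hc).toNat ≠ 0 := by omega
        rw [if_neg hgt, if_neg h0]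
        rw [ih (hc + 1) (acc ++ [r]) (by omega)]
        have he : (2 - (hc + 1)).toNat = (2 - hc).toNat - 1 := by omega
        rw [he, List.append_assoc, List.singleton_append]
    · rw [if_neg hr, if_neg hr]
      rw [ih hc (acc ++ [r]) h, List.append_assoc, List.singleton_append]

-- ===== VERDICT (by name: the statement is the Claim_ definition above) =====
theorem limit_healthy_recommendations_py_spec : Claim_equal_limit_healthy_recommendations_py := by
  intro recs _ _
  unfold Spec_limit_healthy_recommendations_py
  unfold limit_healthy_recommendations_py limit_healthy_recommendations_py_alt
  rw [pvA_gen recs 0 [] (by omega)]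
  have hslice : ∀ l : List Int, PySem.List.slice l (some 2) none = l.drop 2 := by
    intro l
    rw [PySem.List.slice_from l (by omega : (0:Int) ≤ 2)]
    rfl
  have h2 : ((2 : Int) - 0).toNat = 2 := by omega
  simp only [hslice, pvHealthy_indices_eq recs 0, List.nil_append, h2]
  rw [pvB_gen recs 0 2]
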